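-- pv_equiv track=rewrite | github.com/Tomas-Tamantini/advent-of-code-python | models/aoc_2018/a2018_d21/solution.py | optimized_simple_conversion
-- ===== SOURCE A (Python) =====
-- def _calculate_a(a: int, b: int) -> int:
--     new_a = a + (b & 0xFF)
--     new_a &= 0xFFFFFF
--     new_a *= 65899
--     new_a &= 0xFFFFFF
--     return new_a
--
-- def optimized_simple_conversion(input_num: int) -> int:
--     a = 0
--     while True:
--         b = a | 0x10000
--         a = input_num
--         while True:
--             a = _calculate_a(a, b)
--             if b < 256:
--                 return a
--             b //= 256
-- ===== SOURCE B (Python) =====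
-- def optimized_simple_conversion(input_num: int) -> int:
--     # Closed form: the whole hash collapses to one affine map modulo 2**24.
--     # Each round maps a -> (a + d) * 65899 (mod 2**24) with d = 0, 0, 1, so the
--     # composition is a single multiply-add: x * 65899**3 + 65899 (mod 2**24).
--     return (input_num * 65899 ** 3 + 65899) % (2 ** 24)
-- ===== Notes on version B (the rewrite author's own statement) =====
-- stated objective: simpler
-- what changed: Replaces the nested while-loops of iterated add-mask-multiply rounds by the algebraic closed form (x*65899**3 + 65899) mod 2**24, a single multiply-add with no loop, no bitmasking and no byte extraction.
import Mathlib
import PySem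

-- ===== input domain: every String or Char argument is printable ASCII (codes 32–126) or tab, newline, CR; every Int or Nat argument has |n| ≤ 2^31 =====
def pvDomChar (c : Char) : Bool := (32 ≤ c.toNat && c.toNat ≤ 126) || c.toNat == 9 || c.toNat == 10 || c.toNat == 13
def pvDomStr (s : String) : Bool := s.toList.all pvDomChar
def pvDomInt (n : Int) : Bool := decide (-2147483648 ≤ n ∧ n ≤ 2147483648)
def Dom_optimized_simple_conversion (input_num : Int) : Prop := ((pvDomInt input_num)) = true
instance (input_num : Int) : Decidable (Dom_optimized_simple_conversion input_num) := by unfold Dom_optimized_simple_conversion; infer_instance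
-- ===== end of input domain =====

-- B replaces A's two nested while-loops of hash rounds by the algebraic closed form
-- (x*65899^3 + 65899) mod 2^24; objective: simpler.


-- ===== PORT A =====
-- helper _calculate_a, step for step (Python's & on ints = PySem.Int.band, exact on negatives)
def pvCalculateA (a b : Int) : Int :=
  let newA := a + PySem.Int.band b 0xFF
  let newA := PySem.Int.band newA 0xFFFFFF
  let newA := newA * 65899
  let newA := PySem.Int.band newA 0xFFFFFF
  newA

-- the inner 'while True' loop: a = _calculate_a(a, b); if b < 256: return a; b //= 256
def pvInnerLoopA (a b : Int) : Int :=
  let a' := pvCalculateA a b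
  if _h : b < 256 then a'
  else pvInnerLoopA a' (PySem.Int.floordiv b 256)
termination_by b.toNat
decreasing_by
  have h256 : (0:Int) < 256 := by norm_num
  rw [PySem.Int.floordiv_eq_ediv_of_pos h256]
  omega

-- the outer 'while True' loop body runs once: b = 0 | 0x10000; a = input_num; inner loop returns
def optimized_simple_conversion (input_num : Int) : Int :=
  pvInnerLoopA input_num (PySem.Int.bor 0 0x10000)

-- ===== PORT B =====
-- (input_num * 65899 ** 3 + 65899) % (2 ** 24); Python '%' = PySem.Int.mod
def optimized_simple_conversion_alt (input_num : Int) : Int :=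
  PySem.Int.mod (input_num * 65899 ^ 3 + 65899) (2 ^ 24)

-- ===== PRECONDITION & SPEC =====
def Spec_optimized_simple_conversion (input_num : Int) (out : Int) : Prop := out = optimized_simple_conversion_alt input_num
instance (input_num : Int) (out : Int) : Decidable (Spec_optimized_simple_conversion input_num out) := by unfold Spec_optimized_simple_conversion; infer_instance

-- ===== CLAIM (what is proved, stated in full; the proofs are below) =====
def Claim_equal_optimized_simple_conversion : Prop := ∀ (input_num : Int), Dom_optimized_simple_conversion input_num → Spec_optimized_simple_conversion input_num (optimized_simple_conversion input_num)

-- ===== LEMMAS AND PROOFS =====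
-- Python's 'n & 0xFFFFFF' is 'n mod 2^24' (infinite two's complement), for every sign of n
theorem pvBandMask (a : Int) : PySem.Int.band a 0xFFFFFF = a % 16777216 := by
  unfold PySem.Int.band
  have ht : Int.toNat 16777215 = 2^24 - 1 := by decide
  split_ifs with h h2 h2
  · rw [ht, Nat.and_two_pow_sub_one_eq_mod]
    omega
  · omega
  · rw [ht, Nat.and_comm, Nat.and_two_pow_sub_one_eq_mod]
    omega
  · omega

theorem pvByte_65536 : PySem.Int.band 65536 0xFF = 0 := by decide
theorem pvByte_256 : PySem.Int.band 256 0xFF = 0 := by decide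
theorem pvByte_1 : PySem.Int.band 1 0xFF = 1 := by decide
theorem pvDiv_65536 : PySem.Int.floordiv 65536 256 = 256 := by decide
theorem pvDiv_256 : PySem.Int.floordiv 256 256 = 1 := by decide
theorem pvBor_init : PySem.Int.bor 0 0x10000 = 65536 := by decide

-- one hash round, as plain modular arithmetic
theorem pvCalc_mod (a b d : Int) (h : PySem.Int.band b 0xFF = d) :
    pvCalculateA a b = ((a + d) % 16777216) * 65899 % 16777216 := by
  simp [pvCalculateA, h, pvBandMask]

-- the three composed rounds equal the affine closed form mod 2^24
theorem pvClosedForm (x : Int) :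
    ((((((x % 16777216) * 65899) % 16777216) * 65899) % 16777216 + 1) % 16777216 * 65899) % 16777216
      = (x * 65899 ^ 3 + 65899) % 16777216 := by
  have h1 : ((x % 16777216) * 65899) % 16777216 = (x * 65899) % 16777216 := by
    rw [Int.mul_emod, Int.emod_emod_of_dvd _ (dvd_refl _), ← Int.mul_emod]
  rw [h1]
  have h2 : ((x * 65899) % 16777216 * 65899) % 16777216 = (x * 65899 * 65899) % 16777216 := by
    rw [Int.mul_emod, Int.emod_emod_of_dvd _ (dvd_refl _), ← Int.mul_emod]
  rw [h2]
  have h3 : ((x * 65899 * 65899) % 16777216 + 1) % 16777216 * 65899 % 16777216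
      = ((x * 65899 * 65899 + 1) * 65899) % 16777216 := by
    rw [Int.add_emod, Int.emod_emod_of_dvd _ (dvd_refl _), ← Int.add_emod,
        Int.mul_emod, Int.emod_emod_of_dvd _ (dvd_refl _), ← Int.mul_emod]
  rw [h3]
  ring_nf

-- ===== VERDICT (by name: the statement is the Claim_ definition above) =====
theorem optimized_simple_conversion_spec : Claim_equal_optimized_simple_conversion := by
  intro x _
  unfold Spec_optimized_simple_conversion
  unfold optimized_simple_conversion
  rw [pvBor_init]
  rw [pvInnerLoopA]; norm_num [pvDiv_65536]
  rw [pvInnerLoopA]; norm_num [pvDiv_256]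
  rw [pvInnerLoopA]; norm_num
  rw [pvCalc_mod _ _ _ pvByte_65536, pvCalc_mod _ _ _ pvByte_256, pvCalc_mod _ _ _ pvByte_1]
  unfold optimized_simple_conversion_alt
  rw [PySem.Int.mod_eq_emod_of_pos (by norm_num)]
  norm_num
  have := pvClosedForm x
  norm_num at this
  exact this
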